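-- pv_equiv track=rewrite | github.com/RulonOboev4444/MyLittleHarness | src/mylittleharness/planning.py | _pruned_target_artifact_routes
-- ===== SOURCE A (Python) =====
-- def _pruned_target_artifact_routes(routes: tuple[str, ...]) -> tuple[str, ...]:
--     exact = tuple(route for route in routes if not _is_broad_target_artifact_route(route))
--     if not exact:
--         return routes
--     pruned: list[str] = []
--     for route in routes:
--         if _is_ambiguous_context_route(route):
--             continue
--         if _is_broad_target_artifact_route(route) and any(_route_is_within_broad_target(exact_route, route) for exact_route in exact):
--             continue
--         pruned.append(route)
--     return tuple(_dedupe_nonempty(pruned))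
--
-- def _is_ambiguous_context_route(route: str) -> bool:
--     return _normalize_rel(route).casefold() in {"docs/tests", "tests/docs"}
--
-- def _is_broad_target_artifact_route(route: str) -> bool:
--     normalized = _normalize_rel(route).casefold()
--     if "*" in normalized:
--         return True
--     leaf = normalized.rstrip("/").rsplit("/", 1)[-1]
--     return "." not in leaf and normalized.startswith(("src/", "tests/", "docs/", "project/specs/"))
--
-- def _route_is_within_broad_target(route: str, broad: str) -> bool:
--     exact = _normalize_rel(route).casefold()
--     broad_norm = _normalize_rel(broad).casefold().rstrip("/")
--     if "*" in broad_norm: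
--         return exact.startswith(broad_norm.split("*", 1)[0])
--     return exact.startswith(f"{broad_norm}/")
--
-- def _normalize_rel(value: str) -> str:
--     return value.replace("\\", "/").strip("/")
--
-- def _dedupe_nonempty(values) -> list[str]:
--     deduped: list[str] = []
--     seen: set[str] = set()
--     for raw in values:
--         value = str(raw or "").strip()
--         if value and value not in seen:
--             deduped.append(value)
--             seen.add(value)
--     return deduped
-- ===== SOURCE B (Python) =====
-- def _pruned_target_artifact_routes(routes: tuple[str, ...]) -> tuple[str, ...]:
--     norms = [r.replace("\\", "/").strip("/").casefold() for r in routes]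
--     if all(_is_broad(n) for n in norms):
--         return routes  # no exact route: nothing can be pruned
--     # all prefixes of every exact (non-broad) normalized route, built once;
--     # only needed when there is a broad route to test against it
--     if any(_is_broad(n) for n in norms):
--         prefixes = {n[:k] for n in norms if not _is_broad(n) for k in range(len(n) + 1)}
--     else:
--         prefixes = set()
--     out: list[str] = []
--     seen: set[str] = set()
--     for route, n in zip(routes, norms):
--         if n in ("docs/tests", "tests/docs"):
--             continue
--         if _is_broad(n) and (n.split("*", 1)[0] if "*" in n else n + "/") in prefixes:
--             continue
--         value = route.strip()
--         if value and value not in seen: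
--             out.append(value)
--             seen.add(value)
--     return tuple(out)
--
-- def _is_broad(n: str) -> bool:
--     # n is already normalized (no leading/trailing "/") and casefolded
--     if "*" in n:
--         return True
--     leaf = n.rsplit("/", 1)[-1]
--     return "." not in leaf and n.startswith(("src/", "tests/", "docs/", "project/specs/"))
-- ===== Notes on version B (the rewrite author's own statement) =====
-- stated objective: faster
-- what changed: B normalizes every route once and builds a hash set of all prefixes of the normalized exact routes up front, so each broad route is checked by a single set lookup (and dedup happens inline) instead of A's re-normalizing scan over all exact routes for every route.
import Mathlib
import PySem

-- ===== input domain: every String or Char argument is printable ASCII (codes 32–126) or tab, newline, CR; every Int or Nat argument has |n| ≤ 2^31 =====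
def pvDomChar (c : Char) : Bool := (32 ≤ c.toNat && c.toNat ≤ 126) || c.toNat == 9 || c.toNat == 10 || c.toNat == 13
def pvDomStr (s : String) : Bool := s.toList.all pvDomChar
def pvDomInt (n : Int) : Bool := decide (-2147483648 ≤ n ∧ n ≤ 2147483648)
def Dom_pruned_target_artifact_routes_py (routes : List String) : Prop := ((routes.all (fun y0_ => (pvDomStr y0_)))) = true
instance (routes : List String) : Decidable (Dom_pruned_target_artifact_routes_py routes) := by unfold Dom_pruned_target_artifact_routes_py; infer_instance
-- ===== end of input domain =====

-- B replaces A's per-broad-route scan over all exact routes by a prefix set of the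
-- normalized exact routes built once (plus one-shot normalization and inline dedup);
-- objective: faster. str.casefold is ported as lower (exact on the ASCII domain).

-- ===== PORT A =====
-- _normalize_rel(value) = value.replace("\\", "/").strip("/")
def pvNormRelA (cs : List Char) : List Char :=
  PySem.Chars.stripChars (PySem.Chars.replace cs ['\\'] ['/']) ['/']

-- s.rstrip("/"), hand-ported (exact: drop trailing chars from the given set)
def pvRstripSlashA (cs : List Char) : List Char :=
  (List.dropWhile (fun c => ['/'].contains c) cs.reverse).reverse

-- s.rsplit("/", 1)[-1], hand-ported for the one-char separator (exact: the part after the last '/')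
def pvLastSegA (cs : List Char) : List Char :=
  (cs.reverse.takeWhile (fun c => c != '/')).reverse

def pvIsAmbiguousA (route : List Char) : Bool :=
  let n := PySem.Chars.lower (pvNormRelA route)
  n == "docs/tests".toList || n == "tests/docs".toList

def pvIsBroadA (route : List Char) : Bool :=
  let n := PySem.Chars.lower (pvNormRelA route)
  if PySem.Chars.isIn ['*'] n then true
  else
    let leaf := pvLastSegA (pvRstripSlashA n)
    !(PySem.Chars.isIn ['.'] leaf) &&
      (PySem.Chars.startswith n "src/".toList || PySem.Chars.startswith n "tests/".toList ||
       PySem.Chars.startswith n "docs/".toList || PySem.Chars.startswith n "project/specs/".toList)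

-- broad.split("*", 1)[0] ported as takeWhile (· != '*') (exact: the part before the first '*')
def pvWithinA (exactRoute broad : List Char) : Bool :=
  let e := PySem.Chars.lower (pvNormRelA exactRoute)
  let bn := pvRstripSlashA (PySem.Chars.lower (pvNormRelA broad))
  if PySem.Chars.isIn ['*'] bn then PySem.Chars.startswith e (bn.takeWhile (fun c => c != '*'))
  else PySem.Chars.startswith e (bn ++ ['/'])

def pvDedupeA (values : List String) : List String :=
  (values.foldl (fun (st : List String × PySem.Set String) raw =>
      let v := PySem.Str.strip raw
      if v != "" && !(st.2.contains v) then (st.1 ++ [v], st.2.add v) else st)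
    (([], PySem.Set.empty) : List String × PySem.Set String)).1

def pruned_target_artifact_routes_py (routes : List String) : List String :=
  let exact := routes.filter (fun r => !pvIsBroadA r.toList)
  if exact.isEmpty then routes
  else
    let pruned := routes.foldl (fun acc r =>
      if pvIsAmbiguousA r.toList then acc
      else if pvIsBroadA r.toList && exact.any (fun ex => pvWithinA ex.toList r.toList) then acc
      else acc ++ [r]) ([] : List String)
    pvDedupeA pruned

-- ===== PORT B =====
def pvNormB (cs : List Char) : List Char :=
  PySem.Chars.lower (PySem.Chars.stripChars (PySem.Chars.replace cs ['\\'] ['/']) ['/'])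

-- _is_broad(n): n is already normalized and casefolded
def pvIsBroadB (n : List Char) : Bool :=
  PySem.Chars.isIn ['*'] n ||
    (!(PySem.Chars.isIn ['.'] ((n.reverse.takeWhile (fun c => c != '/')).reverse)) &&
     (PySem.Chars.startswith n "src/".toList || PySem.Chars.startswith n "tests/".toList ||
      PySem.Chars.startswith n "docs/".toList || PySem.Chars.startswith n "project/specs/".toList))

def pruned_target_artifact_routes_py_alt (routes : List String) : List String :=
  let norms := routes.map (fun r => pvNormB r.toList)
  if norms.all (fun n => pvIsBroadB n) then routes
  else
    let prefixes : PySem.Set (List Char) :=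
      if norms.any (fun n => pvIsBroadB n) then
        (norms.filter (fun n => !pvIsBroadB n)).foldl
          (fun s n => (PySem.List.pyRange 0 (n.length + 1)).foldl
            (fun s k => s.add (PySem.Chars.slice n none (some k))) s)
          PySem.Set.empty
      else PySem.Set.empty
    ((routes.zip norms).foldl (fun (st : List String × PySem.Set String) p =>
        if p.2 == "docs/tests".toList || p.2 == "tests/docs".toList then st
        else if pvIsBroadB p.2 &&
            prefixes.contains (if PySem.Chars.isIn ['*'] p.2 then p.2.takeWhile (fun c => c != '*') else p.2 ++ ['/']) then st
        else
          let v := PySem.Str.strip p.1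
          if v != "" && !(st.2.contains v) then (st.1 ++ [v], st.2.add v) else st)
      (([], PySem.Set.empty) : List String × PySem.Set String)).1

-- ===== PRECONDITION & SPEC =====
def Spec_pruned_target_artifact_routes_py (routes : List String) (out : List String) : Prop := out = pruned_target_artifact_routes_py_alt routes
instance (routes : List String) (out : List String) : Decidable (Spec_pruned_target_artifact_routes_py routes out) := by unfold Spec_pruned_target_artifact_routes_py; infer_instance

-- ===== CLAIM (what is proved, stated in full; the proofs are below) =====
def Claim_equal_pruned_target_artifact_routes_py : Prop := ∀ (routes : List String), Dom_pruned_target_artifact_routes_py routes → Spec_pruned_target_artifact_routes_py routes (pruned_target_artifact_routes_py routes)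

-- ===== LEMMAS AND PROOFS =====

theorem pv_lowerChar_ne_slash {c : Char} (h : (c == '/') = false) :
    (PySem.Chars.lowerChar c == '/') = false := by
  simp only [PySem.Chars.lowerChar, PySem.Chars.isupper]
  split
  · next hc =>
    simp only [Bool.and_eq_true, decide_eq_true_eq] at hc
    obtain ⟨h1, h2⟩ := hc
    have h1' : 65 ≤ c.toNat := h1
    have h2' : c.toNat ≤ 90 := h2
    have hval : (c.toNat + 32).isValidChar := by constructor; omega
    have hv : (Char.ofNat (c.toNat + 32)).toNat = c.toNat + 32 := by
      rw [Char.ofNat, dif_pos hval]; exact Char.toNat_ofNatAux hval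
    simp only [beq_eq_false_iff_ne, ne_eq]
    intro he
    have h47 : (Char.ofNat (c.toNat + 32)).toNat = 47 := by rw [he]; rfl
    omega
  · exact h

theorem pv_rstrip_norm (cs : List Char) : pvRstripSlashA (pvNormB cs) = pvNormB cs := by
  unfold pvRstripSlashA pvNormB
  simp only [PySem.Chars.lower, PySem.Chars.stripChars]
  set p : Char → Bool := fun c => ['/'].contains c with hp
  set d : List Char := List.dropWhile p ((List.dropWhile p (PySem.Chars.replace cs ['\\'] ['/'])).reverse) with hd
  rw [List.map_reverse, List.reverse_reverse]
  suffices h : List.dropWhile p (List.map PySem.Chars.lowerChar d) = List.map PySem.Chars.lowerChar d by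
    rw [h]
  rw [List.dropWhile_eq_self_iff]
  intro hl
  have hlen : 0 < d.length := by simpa using hl
  have h0 : ¬ p d[0] = true := List.dropWhile_get_zero_not p _ hlen
  have : (List.map PySem.Chars.lowerChar d)[0] = PySem.Chars.lowerChar d[0] := by
    simp
  rw [this]
  simp only [hp, List.contains_cons, List.contains_nil, Bool.or_false] at h0 ⊢
  have hne : (d[0] == '/') = false := by
    cases h : (d[0] == '/') with
    | true => exact absurd (by simpa [BEq.comm] using h) h0
    | false => rfl
  have := pv_lowerChar_ne_slash hne
  simp only [Bool.not_eq_true]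
  exact this

theorem pv_mem_foldl_add {α β : Type} [BEq α] [LawfulBEq α] (g : β → α) (l : List β)
    (s : PySem.Set α) (y : α) :
    (y ∈ l.foldl (fun s x => s.add (g x)) s) ↔ y ∈ s ∨ ∃ x ∈ l, y = g x := by
  induction l generalizing s with
  | nil => simp
  | cons a t ih =>
    simp only [List.foldl_cons, ih, PySem.Set.mem_add, List.mem_cons]
    constructor
    · rintro (⟨hs | he⟩ | ⟨x, hx, hy⟩)
      · exact Or.inl hs
      · exact Or.inr ⟨a, Or.inl rfl, he⟩
      · exact Or.inr ⟨x, Or.inr hx, hy⟩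
    · rintro (hs | ⟨x, (rfl | hx), hy⟩)
      · exact Or.inl (Or.inl hs)
      · exact Or.inl (Or.inr hy)
      · exact Or.inr ⟨x, hx, hy⟩

-- prefixes of one string: inner fold over range
theorem pv_mem_prefix_fold (n y : List Char) (s : PySem.Set (List Char)) :
    (y ∈ (PySem.List.pyRange 0 (n.length + 1)).foldl
        (fun s k => s.add (PySem.Chars.slice n none (some k))) s) ↔ y ∈ s ∨ y <+: n := by
  rw [pv_mem_foldl_add]
  constructor
  · rintro (hs | ⟨k, hk, rfl⟩)
    · exact Or.inl hs
    · right
      rw [PySem.List.mem_pyRange_one] at hk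
      rw [PySem.Chars.slice_eq_listSlice, PySem.List.slice_to n hk.1]
      exact List.take_prefix _ _
  · rintro (hs | hp)
    · exact Or.inl hs
    · right
      refine ⟨(y.length : Int), ?_, ?_⟩
      · rw [PySem.List.mem_pyRange_one]
        have := hp.length_le
        omega
      · rw [PySem.Chars.slice_eq_listSlice, PySem.List.slice_to n (by positivity)]
        simpa using List.prefix_iff_eq_take.mp hp
theorem pv_zip_map_foldl {α β σ : Type} (l : List α) (f : α → β) (g : σ → α × β → σ) (st : σ) :
    (l.zip (l.map f)).foldl g st = l.foldl (fun st x => g st (x, f x)) st := by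
  induction l generalizing st with
  | nil => rfl
  | cons a t ih => simp [List.zip_cons_cons, ih]

theorem pv_foldl_skip2 {α σ : Type} (c1 c2 : α → Bool) (d : σ → α → σ) (l : List α) (st : σ) :
    l.foldl (fun st x => if c1 x then st else if c2 x then st else d st x) st
      = (l.filter (fun x => !c1 x && !c2 x)).foldl d st := by
  induction l generalizing st with
  | nil => rfl
  | cons a t ih =>
    cases h1 : c1 a <;> cases h2 : c2 a <;> simp [h1, h2, ih]

theorem pv_foldl_append_filter {α : Type} (c1 c2 : α → Bool) (l : List α) (acc : List α) :
    l.foldl (fun acc r => if c1 r then acc else if c2 r then acc else acc ++ [r]) acc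
      = acc ++ l.filter (fun r => !c1 r && !c2 r) := by
  induction l generalizing acc with
  | nil => simp
  | cons a t ih =>
    cases h1 : c1 a <;> cases h2 : c2 a <;> simp [h1, h2, ih]

theorem pv_mem_prefixes (l : List (List Char)) (s0 : PySem.Set (List Char)) (y : List Char) :
    (y ∈ l.foldl (fun s n => (PySem.List.pyRange 0 (n.length + 1)).foldl
        (fun s k => s.add (PySem.Chars.slice n none (some k))) s) s0) ↔
      y ∈ s0 ∨ ∃ n ∈ l, y <+: n := by
  induction l generalizing s0 with
  | nil => simp
  | cons a t ih =>
    simp only [List.foldl_cons, ih, pv_mem_prefix_fold, List.mem_cons]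
    constructor
    · rintro (⟨hs | hp⟩ | ⟨n, hn, hy⟩)
      · exact Or.inl hs
      · exact Or.inr ⟨a, Or.inl rfl, hp⟩
      · exact Or.inr ⟨n, Or.inr hn, hy⟩
    · rintro (hs | ⟨n, (rfl | hn), hy⟩)
      · exact Or.inl (Or.inl hs)
      · exact Or.inl (Or.inr hy)
      · exact Or.inr ⟨n, hn, hy⟩

theorem pv_rstrip_norm' (cs : List Char) :
    pvRstripSlashA (PySem.Chars.lower (pvNormRelA cs)) = PySem.Chars.lower (pvNormRelA cs) :=
  pv_rstrip_norm cs

theorem pv_broad_eq (cs : List Char) : pvIsBroadA cs = pvIsBroadB (pvNormB cs) := by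
  simp only [pvIsBroadA, pvIsBroadB, pvNormRelA, pvNormB]
  cases h : PySem.Chars.isIn ['*']
      (PySem.Chars.lower (PySem.Chars.stripChars (PySem.Chars.replace cs ['\\'] ['/']) ['/'])) with
  | true => simp
  | false =>
    simp only [Bool.false_or]
    rw [show pvRstripSlashA (PySem.Chars.lower (PySem.Chars.stripChars
          (PySem.Chars.replace cs ['\\'] ['/']) ['/']))
        = PySem.Chars.lower (PySem.Chars.stripChars (PySem.Chars.replace cs ['\\'] ['/']) ['/'])
      from pv_rstrip_norm cs]
    rfl

theorem pv_main (routes : List String) :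
    pruned_target_artifact_routes_py routes = pruned_target_artifact_routes_py_alt routes := by
  simp only [pruned_target_artifact_routes_py, pruned_target_artifact_routes_py_alt]
  set f : String → List Char := fun r => pvNormB r.toList with hf
  have hfr : ∀ r : String, f r = pvNormB r.toList := fun r => by rw [hf]
  set exact : List String := routes.filter (fun r => !pvIsBroadA r.toList) with hexact
  set prefixes : PySem.Set (List Char) :=
    if (routes.map f).any (fun n => pvIsBroadB n) then
      ((routes.map f).filter (fun n => !pvIsBroadB n)).foldl
        (fun s n => (PySem.List.pyRange 0 (n.length + 1)).foldl
          (fun s k => s.add (PySem.Chars.slice n none (some k))) s)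
        PySem.Set.empty
    else PySem.Set.empty with hpre
  -- the exact-normal list is the image of A's exact list
  have hfe : (routes.map f).filter (fun n => !pvIsBroadB n) = exact.map f := by
    rw [List.filter_map, hexact]
    congr 1
    apply List.filter_congr
    intro r _
    simp only [Function.comp_apply, hf, pv_broad_eq r.toList]
  -- the two emptiness guards agree
  have hguard : exact.isEmpty = (routes.map f).all (fun n => pvIsBroadB n) := by
    rw [Bool.eq_iff_iff, List.isEmpty_iff, hexact, List.filter_eq_nil_iff, List.all_eq_true]
    constructor
    · intro h n hn
      rcases List.mem_map.mp hn with ⟨r, hr, rfl⟩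
      have hA := h r hr
      simp only [Bool.not_eq_true, Bool.not_eq_eq_eq_not, Bool.not_true] at hA
      rw [hfr, ← pv_broad_eq]
      simpa using hA
    · intro h r hr
      have hB := h (f r) (List.mem_map_of_mem hr)
      rw [hfr, ← pv_broad_eq] at hB
      simp [hB]
  rw [hguard]
  split
  · rfl
  -- the surviving-route tests agree pointwise
  have hw : ∀ (ex r : String), pvWithinA ex.toList r.toList =
      PySem.Chars.startswith (f ex)
        (if PySem.Chars.isIn ['*'] (f r) then (f r).takeWhile (fun c => c != '*')
         else f r ++ ['/']) := by
    intro ex r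
    simp only [pvWithinA]
    simp only [pv_rstrip_norm']
    simp only [hf, pvNormB, pvNormRelA]
    split <;> rfl
  have hkeep : ∀ r ∈ routes,
      (!pvIsAmbiguousA r.toList &&
        !(pvIsBroadA r.toList && exact.any (fun ex => pvWithinA ex.toList r.toList)))
      = (!(f r == "docs/tests".toList || f r == "tests/docs".toList) &&
        !(pvIsBroadB (f r) && prefixes.contains
          (if PySem.Chars.isIn ['*'] (f r) then (f r).takeWhile (fun c => c != '*')
           else f r ++ ['/']))) := by
    intro r hr
    have h1 : pvIsAmbiguousA r.toList
        = (f r == "docs/tests".toList || f r == "tests/docs".toList) := rfl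
    by_cases hbr : (routes.map f).any (fun n => pvIsBroadB n) = true
    · -- some broad route exists: the prefix set is really built, use its membership law
      have hpe : prefixes = ((routes.map f).filter (fun n => !pvIsBroadB n)).foldl
          (fun s n => (PySem.List.pyRange 0 (n.length + 1)).foldl
            (fun s k => s.add (PySem.Chars.slice n none (some k))) s)
          PySem.Set.empty := by rw [hpre, if_pos hbr]
      have hmem : ∀ y : List Char, prefixes.contains y = exact.any
          (fun ex => PySem.Chars.startswith (f ex) y) := by
        intro y
        rw [Bool.eq_iff_iff, PySem.Set.contains, List.contains_iff_mem, hpe, hfe,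
          pv_mem_prefixes, List.any_eq_true]
        simp only [PySem.Set.empty, List.not_mem_nil, false_or, List.mem_map]
        constructor
        · rintro ⟨n, ⟨ex, hex, rfl⟩, hy⟩
          exact ⟨ex, hex, (PySem.Chars.startswith_iff _ _).mpr hy⟩
        · rintro ⟨ex, hex, hy⟩
          exact ⟨f ex, ⟨ex, hex, rfl⟩, (PySem.Chars.startswith_iff _ _).mp hy⟩
      simp only [h1, hw, hmem, pv_broad_eq r.toList]
      rfl
    · -- no broad route at all: both subsumption tests are false
      have hnb : pvIsBroadB (f r) = false := by
        by_contra hc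
        exact hbr (List.any_eq_true.mpr ⟨f r, List.mem_map_of_mem hr,
          by simpa using hc⟩)
      have hna : pvIsBroadA r.toList = false := by
        rw [pv_broad_eq, ← hfr]; exact hnb
      simp only [h1, hna, hnb, Bool.false_and, Bool.not_false, Bool.and_true]
  -- A: accumulate-then-dedupe = dedupe-fold over the filtered list
  rw [pv_foldl_append_filter (fun r => pvIsAmbiguousA r.toList)
    (fun r => pvIsBroadA r.toList && exact.any (fun ex => pvWithinA ex.toList r.toList)) routes []]
  rw [List.nil_append]
  -- B: eliminate the zip, then pull the two skip-tests into a filter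
  rw [pv_zip_map_foldl routes f _ (([], PySem.Set.empty) : List String × PySem.Set String)]
  have hB : routes.foldl
      (fun (st : List String × PySem.Set String) x =>
        if f x == "docs/tests".toList || f x == "tests/docs".toList then st
        else if pvIsBroadB (f x) && prefixes.contains
            (if PySem.Chars.isIn ['*'] (f x) then (f x).takeWhile (fun c => c != '*')
             else f x ++ ['/']) then st
        else
          let v := PySem.Str.strip x
          if v != "" && !(st.2.contains v) then (st.1 ++ [v], st.2.add v) else st)
      (([], PySem.Set.empty) : List String × PySem.Set String)
      = ((routes.filter (fun r =>
          !(f r == "docs/tests".toList || f r == "tests/docs".toList) &&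
          !(pvIsBroadB (f r) && prefixes.contains
            (if PySem.Chars.isIn ['*'] (f r) then (f r).takeWhile (fun c => c != '*')
             else f r ++ ['/'])))).foldl
          (fun (st : List String × PySem.Set String) raw =>
            let v := PySem.Str.strip raw
            if v != "" && !(st.2.contains v) then (st.1 ++ [v], st.2.add v) else st)
          (([], PySem.Set.empty) : List String × PySem.Set String)) :=
    pv_foldl_skip2 _ _ _ routes _
  rw [hB]
  simp only [pvDedupeA]
  congr 2
  apply List.filter_congr
  exact hkeep

-- ===== VERDICT (by name: the statement is the Claim_ definition above) =====
theorem pruned_target_artifact_routes_py_spec : Claim_equal_pruned_target_artifact_routes_py := by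
  intro routes _
  unfold Spec_pruned_target_artifact_routes_py
  exact pv_main routes
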